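-- pv_equiv track=rewrite | github.com/ericgiunta/Colossus | GOLD_STANDARD_TEST/write_input.py | add_to_submit
-- ===== SOURCE A (Python) =====
-- def add_to_submit(base,extension,submit_extra):
--     allowed=[]
--     for i in ["5050","2575","7525"]:
--         for j in ["44051","44052","44053","44054"]:
--             allowed.append(i+"_"+j)
--     if ("{base}_{extension}".replace("{base}",base).replace("{extension}",extension) in allowed):
--         submit_extra+="\nsbatch {base}_{extension}.sh\nsleep 1\n".replace("{base}",base).replace("{extension}",extension)
--     return submit_extra
-- ===== SOURCE B (Python) =====
-- def add_to_submit(base, extension, submit_extra):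
--     if base in {"5050", "2575", "7525"} and extension in {"44051", "44052", "44053", "44054"}:
--         submit_extra += f"\nsbatch {base}_{extension}.sh\nsleep 1\n"
--     return submit_extra
-- ===== Notes on version B (the rewrite author's own statement) =====
-- stated objective: simpler
-- what changed: B drops A's nested-loop construction of the 12-element product list and its template-string replace/membership test, testing the factored condition (base in the 3 prefixes and extension in the 4 suffixes) directly and appending the command with an f-string.
import Mathlib
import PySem

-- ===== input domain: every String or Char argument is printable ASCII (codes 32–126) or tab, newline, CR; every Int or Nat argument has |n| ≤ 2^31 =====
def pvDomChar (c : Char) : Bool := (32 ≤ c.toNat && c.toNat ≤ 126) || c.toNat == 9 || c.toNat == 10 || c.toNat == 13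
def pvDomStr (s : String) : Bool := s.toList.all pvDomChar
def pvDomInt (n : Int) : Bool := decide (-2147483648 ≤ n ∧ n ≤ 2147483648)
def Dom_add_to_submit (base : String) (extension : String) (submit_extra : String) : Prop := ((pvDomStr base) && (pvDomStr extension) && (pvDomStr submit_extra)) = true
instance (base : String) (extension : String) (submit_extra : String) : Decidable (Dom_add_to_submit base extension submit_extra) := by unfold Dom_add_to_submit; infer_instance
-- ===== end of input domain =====

-- B replaces A's nested-loop product list and template-replace membership test by a direct
-- factored condition on base and extension (no loops, no list); same return value everywhere.

-- ===== PORT A =====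
def add_to_submit (base : String) (extension : String) (submit_extra : String) : String :=
  let allowed : List String :=
    ["5050", "2575", "7525"].foldl (fun acc i =>
      ["44051", "44052", "44053", "44054"].foldl (fun acc j =>
        acc ++ [i ++ "_" ++ j]) acc) []
  if allowed.contains
      (PySem.Str.replace (PySem.Str.replace "{base}_{extension}" "{base}" base) "{extension}" extension) then
    submit_extra ++
      PySem.Str.replace (PySem.Str.replace "\nsbatch {base}_{extension}.sh\nsleep 1\n" "{base}" base)
        "{extension}" extension
  else
    submit_extra

-- ===== PORT B =====
def add_to_submit_alt (base : String) (extension : String) (submit_extra : String) : String :=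
  if (base == "5050" || base == "2575" || base == "7525") &&
     (extension == "44051" || extension == "44052" || extension == "44053" || extension == "44054") then
    submit_extra ++ ("\nsbatch " ++ base ++ "_" ++ extension ++ ".sh\nsleep 1\n")
  else
    submit_extra

-- ===== PRECONDITION & SPEC =====
def Spec_add_to_submit (base : String) (extension : String) (submit_extra : String) (out : String) : Prop := out = add_to_submit_alt base extension submit_extra
instance (base : String) (extension : String) (submit_extra : String) (out : String) : Decidable (Spec_add_to_submit base extension submit_extra out) := by unfold Spec_add_to_submit; infer_instance

-- ===== CLAIM (what is proved, stated in full; the proofs are below) =====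
def Claim_equal_add_to_submit : Prop := ∀ (base : String) (extension : String) (submit_extra : String), Dom_add_to_submit base extension submit_extra → Spec_add_to_submit base extension submit_extra (add_to_submit base extension submit_extra)

-- ===== LEMMAS AND PROOFS =====
def pvPat : List Char := "{extension}".toList

-- go on empty list
theorem go_nil (old new : List Char) (f : Nat) (acc : List Char) :
    PySem.Chars.replace.go old new f [] acc = acc.reverse := by
  cases f <;> simp [PySem.Chars.replace.go]

-- copy when no occurrence
theorem go_copy (old new : List Char) :
    ∀ (f : Nat) (l acc : List Char), l.length ≤ f → ¬ old <:+: l →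
      PySem.Chars.replace.go old new f l acc = acc.reverse ++ l := by
  intro f
  induction f with
  | zero =>
      intro l acc hl _
      have hl0 : l = [] := List.eq_nil_of_length_eq_zero (Nat.le_zero.mp hl)
      subst hl0
      simp [go_nil]
  | succ f ih =>
      intro l acc hl hocc
      cases l with
      | nil => simp [go_nil]
      | cons c t =>
          have hpre : old.isPrefixOf (c :: t) = false := by
            rw [Bool.eq_false_iff]
            intro h
            exact hocc ((List.isPrefixOf_iff_prefix.mp h).isInfix)
          simp only [PySem.Chars.replace.go, hpre]
          rw [ih t (c :: acc) (by simpa using Nat.le_of_succ_le_succ hl)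
            (fun h => hocc (h.trans (List.suffix_cons c t).isInfix))]
          · simp

-- reference replacement on the prefix part (proof helper)
def pvRepl (e : List Char) : List Char → List Char
  | [] => []
  | c :: t =>
      if pvPat.isPrefixOf (c :: t) then e ++ pvRepl e (t.drop 10) else c :: pvRepl e t
termination_by l => l.length
decreasing_by
  all_goals simp

-- consuming the trailing pattern
theorem go_pat (e : List Char) (f : Nat) (acc : List Char) (hf : 11 ≤ f) :
    PySem.Chars.replace.go pvPat e f pvPat acc = acc.reverse ++ e := by
  obtain ⟨f', rfl⟩ : ∃ f', f = f' + 1 := ⟨f - 1, by omega⟩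
  show PySem.Chars.replace.go pvPat e (f' + 1) pvPat acc = acc.reverse ++ e
  rw [show (pvPat : List Char) = '{' :: "extension}".toList from rfl]
  simp only [PySem.Chars.replace.go]
  rw [show ('{' :: "extension}".toList).isPrefixOf ('{' :: "extension}".toList) = true from by decide]
  simp only [if_pos]
  rw [show List.drop ('{' :: "extension}".toList).length ('{' :: "extension}".toList) = ([] : List Char) from by decide]
  rw [go_nil]
  simp

theorem go_main (e : List Char) :
    ∀ (f : Nat) (b acc : List Char), b.length + 12 ≤ f →
      PySem.Chars.replace.go pvPat e f (b ++ '_' :: pvPat) acc =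
        acc.reverse ++ pvRepl e b ++ '_' :: e := by
  intro f
  induction f with
  | zero => intro b acc h; omega
  | succ f ih =>
      intro b acc h
      cases b with
      | nil =>
          have hnp : pvPat.isPrefixOf ('_' :: pvPat) = false := by decide
          show PySem.Chars.replace.go pvPat e (f + 1) ('_' :: pvPat) acc = _
          simp only [PySem.Chars.replace.go, hnp]
          rw [go_pat e f ('_' :: acc) (by omega)]
          simp [pvRepl]
      | cons c t =>
          by_cases hp : pvPat.isPrefixOf (c :: t) = true
          · have hlen : 11 ≤ (c :: t).length := by
              have := (List.isPrefixOf_iff_prefix.mp hp).length_le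
              simpa [pvPat] using this
            have hp' : pvPat.isPrefixOf ((c :: t) ++ '_' :: pvPat) = true :=
              List.isPrefixOf_iff_prefix.mpr ((List.isPrefixOf_iff_prefix.mp hp).trans (List.prefix_append _ _))
            show PySem.Chars.replace.go pvPat e (f + 1) (c :: (t ++ '_' :: pvPat)) acc = _
            have hp'' : pvPat.isPrefixOf (c :: (t ++ '_' :: pvPat)) = true := by
              simpa using hp'
            simp only [PySem.Chars.replace.go, hp'']
            have h10 : 10 ≤ t.length := by
              simp at hlen; omega
            rw [show List.drop pvPat.length (c :: (t ++ '_' :: pvPat)) = (t.drop 10) ++ '_' :: pvPat from by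
              rw [show (pvPat.length) = 11 from rfl]
              simp only [List.drop_succ_cons]
              exact List.drop_append_of_le_length h10]
            have hlt : (t.drop 10).length + 12 ≤ f := by
              simp only [List.length_drop]
              simp at h
              omega
            rw [ih (t.drop 10) (e.reverse ++ acc) hlt]
            rw [show pvRepl e (c :: t) = e ++ pvRepl e (t.drop 10) from by rw [pvRepl, if_pos hp]]
            simp
          · have hpf : pvPat.isPrefixOf (c :: t) = false := Bool.eq_false_iff.mpr hp
            have hp2 : pvPat.isPrefixOf (c :: (t ++ '_' :: pvPat)) = false := by
              rw [Bool.eq_false_iff]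
              intro hcontra
              have hpref := List.isPrefixOf_iff_prefix.mp hcontra
              have h11 : pvPat.length ≤ t.length + 1 := by
                by_contra hgt
                have hmem : '_' ∈ pvPat := by
                  have hget : (c :: (t ++ '_' :: pvPat)).take pvPat.length = pvPat :=
                    (List.prefix_iff_eq_take.mp hpref).symm
                  have : '_' ∈ (c :: (t ++ '_' :: pvPat)).take pvPat.length := by
                    rw [List.mem_take_iff_getElem]
                    refine ⟨t.length + 1, by simp; omega, ?_⟩
                    simp [List.getElem_append_right (by omega : t.length ≤ t.length)]
                  rwa [hget] at this
                exact absurd hmem (by decide)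
              have heq : pvPat = (c :: t).take pvPat.length := by
                have h0 := List.prefix_iff_eq_take.mp hpref
                rwa [show (c :: (t ++ '_' :: pvPat)) = (c :: t) ++ ('_' :: pvPat) from by simp,
                  List.take_append_of_le_length (by simpa using h11)] at h0
              exact absurd (List.isPrefixOf_iff_prefix.mpr (List.prefix_iff_eq_take.mpr heq)) hp
            show PySem.Chars.replace.go pvPat e (f + 1) (c :: (t ++ '_' :: pvPat)) acc = _
            simp only [PySem.Chars.replace.go, hp2]
            rw [ih t (c :: acc) (by simp at h ⊢; omega)]
            rw [show pvRepl e (c :: t) = c :: pvRepl e t from by rw [pvRepl, if_neg (by simp [hpf])]]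
            simp

theorem repl_cases (e : List Char) : ∀ b : List Char, pvRepl e b = b ∨ e <:+: pvRepl e b := by
  intro b
  induction b using pvRepl.induct with
  | case1 => left; rw [pvRepl]
  | case2 c t hp ih =>
      right
      rw [pvRepl, if_pos hp]
      exact (List.prefix_append e _).isInfix
  | case3 c t hp ih =>
      rw [pvRepl, if_neg hp]
      rcases ih with h | h
      · left; rw [h]
      · right; exact h.trans (List.suffix_cons c _).isInfix

theorem uniq_split : ∀ (x y u v : List Char), '_' ∉ x → '_' ∉ y →
    x ++ '_' :: u = y ++ '_' :: v → x = y ∧ u = v := by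
  intro x
  induction x with
  | nil =>
      intro y u v _ hy h
      cases y with
      | nil => simpa using h
      | cons d ys =>
          simp only [List.nil_append, List.cons_append, List.cons.injEq] at h
          exact absurd (show '_' ∈ d :: ys from h.1 ▸ List.mem_cons_self) hy
  | cons a xs ih =>
      intro y u v hx hy h
      cases y with
      | nil =>
          simp only [List.cons_append, List.nil_append, List.cons.injEq] at h
          exact absurd (show '_' ∈ a :: xs from h.1.symm ▸ List.mem_cons_self) hx
      | cons d ys =>
          simp only [List.cons_append, List.cons.injEq] at h
          obtain ⟨rfl, h2⟩ := h
          obtain ⟨h3, h4⟩ := ih ys u v (fun hm => hx (List.mem_cons_of_mem _ hm))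
            (fun hm => hy (List.mem_cons_of_mem _ hm)) h2
          exact ⟨by rw [h3], h4⟩

theorem first_replace (b : List Char) :
    PySem.Chars.replace "{base}_{extension}".toList "{base}".toList b = b ++ '_' :: pvPat := by
  rw [PySem.Chars.replace]
  rw [if_neg (by decide)]
  rw [show ("{base}_{extension}".toList.length) = 17 + 1 from by decide]
  rw [show ("{base}_{extension}".toList : List Char) = '{' :: "base}_{extension}".toList from rfl]
  simp only [PySem.Chars.replace.go]
  rw [show ("{base}".toList.isPrefixOf ('{' :: "base}_{extension}".toList)) = true from by decide]
  simp only [if_pos]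
  rw [show (List.drop "{base}".toList.length ('{' :: "base}_{extension}".toList)) = '_' :: pvPat from by decide]
  rw [go_copy "{base}".toList b 17 ('_' :: pvPat) (b.reverse ++ []) (by decide)
    (by decide)]
  simp

theorem second_replace (b e : List Char) :
    PySem.Chars.replace (b ++ '_' :: pvPat) pvPat e = pvRepl e b ++ '_' :: e := by
  rw [PySem.Chars.replace]
  rw [if_neg (by decide)]
  exact go_main e _ b [] (by simp [pvPat])

theorem case_lemma (b e B E : List Char) (hB : '_' ∉ B) (hE : '_' ∉ E)
    (hBlen : B.length + 1 ≤ E.length)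
    (h : pvRepl e b ++ '_' :: e = B ++ '_' :: E) : b = B ∧ e = E := by
  have hc := congrArg (List.count '_') h
  simp only [List.count_append, List.count_cons] at hc
  have hB0 : B.count '_' = 0 := List.count_eq_zero.mpr hB
  have hE0 : E.count '_' = 0 := List.count_eq_zero.mpr hE
  rw [hB0, hE0] at hc
  simp at hc
  have hx : '_' ∉ pvRepl e b := List.count_eq_zero.mp (by omega)
  obtain ⟨h1, h2⟩ := uniq_split (pvRepl e b) B e E hx hB h
  refine ⟨?_, h2⟩
  rcases repl_cases e b with h3 | h3
  · rw [← h3, h1]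
  · rw [h1] at h3
    have h4 := h3.length_le
    have h5 := congrArg List.length h2
    omega

theorem cond_forward (base extension : String)
    (h : (["5050_44051","5050_44052","5050_44053","5050_44054",
     "2575_44051","2575_44052","2575_44053","2575_44054",
     "7525_44051","7525_44052","7525_44053","7525_44054"] : List String).contains
      (PySem.Str.replace (PySem.Str.replace "{base}_{extension}" "{base}" base)
        "{extension}" extension) = true) :
    ((base == "5050" || base == "2575" || base == "7525") &&
     (extension == "44051" || extension == "44052" || extension == "44053" ||
       extension == "44054")) = true := by
  have hkey : (PySem.Str.replace (PySem.Str.replace "{base}_{extension}" "{base}" base)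
      "{extension}" extension).toList = pvRepl extension.toList base.toList ++ '_' :: extension.toList := by
    rw [PySem.Str.toList_replace, PySem.Str.toList_replace, first_replace base.toList]
    rw [show ("{extension}".toList : List Char) = pvPat from rfl]
    exact second_replace base.toList extension.toList
  rw [List.contains_iff_mem] at h
  simp only [List.mem_cons, List.not_mem_nil, or_false] at h
  have conc : ∀ (B E : List Char), '_' ∉ B → '_' ∉ E → B.length + 1 ≤ E.length →
      pvRepl extension.toList base.toList ++ '_' :: extension.toList = B ++ '_' :: E →
      base.toList = B ∧ extension.toList = E := fun B E a b c d => case_lemma _ _ B E a b c d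
  rcases h with h | h | h | h | h | h | h | h | h | h | h | h
  all_goals try (
    have ht := congrArg String.toList h
    rw [hkey] at ht
    have ht2 : pvRepl extension.toList base.toList ++ '_' :: extension.toList =
        "5050".toList ++ '_' :: "44051".toList := by rw [ht]; decide
    obtain ⟨h1, h2⟩ := case_lemma _ _ _ _ (by decide) (by decide) (by decide) ht2
    have hb := String.toList_inj.mp h1
    have he := String.toList_inj.mp h2
    subst hb; subst he
    decide)
  all_goals try (
    have ht := congrArg String.toList h
    rw [hkey] at ht
    have ht2 : pvRepl extension.toList base.toList ++ '_' :: extension.toList =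
        "5050".toList ++ '_' :: "44052".toList := by rw [ht]; decide
    obtain ⟨h1, h2⟩ := case_lemma _ _ _ _ (by decide) (by decide) (by decide) ht2
    have hb := String.toList_inj.mp h1
    have he := String.toList_inj.mp h2
    subst hb; subst he
    decide)
  all_goals try (
    have ht := congrArg String.toList h
    rw [hkey] at ht
    have ht2 : pvRepl extension.toList base.toList ++ '_' :: extension.toList =
        "5050".toList ++ '_' :: "44053".toList := by rw [ht]; decide
    obtain ⟨h1, h2⟩ := case_lemma _ _ _ _ (by decide) (by decide) (by decide) ht2
    have hb := String.toList_inj.mp h1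
    have he := String.toList_inj.mp h2
    subst hb; subst he
    decide)
  all_goals try (
    have ht := congrArg String.toList h
    rw [hkey] at ht
    have ht2 : pvRepl extension.toList base.toList ++ '_' :: extension.toList =
        "5050".toList ++ '_' :: "44054".toList := by rw [ht]; decide
    obtain ⟨h1, h2⟩ := case_lemma _ _ _ _ (by decide) (by decide) (by decide) ht2
    have hb := String.toList_inj.mp h1
    have he := String.toList_inj.mp h2
    subst hb; subst he
    decide)
  all_goals try (
    have ht := congrArg String.toList h
    rw [hkey] at ht
    have ht2 : pvRepl extension.toList base.toList ++ '_' :: extension.toList =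
        "2575".toList ++ '_' :: "44051".toList := by rw [ht]; decide
    obtain ⟨h1, h2⟩ := case_lemma _ _ _ _ (by decide) (by decide) (by decide) ht2
    have hb := String.toList_inj.mp h1
    have he := String.toList_inj.mp h2
    subst hb; subst he
    decide)
  all_goals try (
    have ht := congrArg String.toList h
    rw [hkey] at ht
    have ht2 : pvRepl extension.toList base.toList ++ '_' :: extension.toList =
        "2575".toList ++ '_' :: "44052".toList := by rw [ht]; decide
    obtain ⟨h1, h2⟩ := case_lemma _ _ _ _ (by decide) (by decide) (by decide) ht2
    have hb := String.toList_inj.mp h1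
    have he := String.toList_inj.mp h2
    subst hb; subst he
    decide)
  all_goals try (
    have ht := congrArg String.toList h
    rw [hkey] at ht
    have ht2 : pvRepl extension.toList base.toList ++ '_' :: extension.toList =
        "2575".toList ++ '_' :: "44053".toList := by rw [ht]; decide
    obtain ⟨h1, h2⟩ := case_lemma _ _ _ _ (by decide) (by decide) (by decide) ht2
    have hb := String.toList_inj.mp h1
    have he := String.toList_inj.mp h2
    subst hb; subst he
    decide)
  all_goals try (
    have ht := congrArg String.toList h
    rw [hkey] at ht
    have ht2 : pvRepl extension.toList base.toList ++ '_' :: extension.toList =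
        "2575".toList ++ '_' :: "44054".toList := by rw [ht]; decide
    obtain ⟨h1, h2⟩ := case_lemma _ _ _ _ (by decide) (by decide) (by decide) ht2
    have hb := String.toList_inj.mp h1
    have he := String.toList_inj.mp h2
    subst hb; subst he
    decide)
  all_goals try (
    have ht := congrArg String.toList h
    rw [hkey] at ht
    have ht2 : pvRepl extension.toList base.toList ++ '_' :: extension.toList =
        "7525".toList ++ '_' :: "44051".toList := by rw [ht]; decide
    obtain ⟨h1, h2⟩ := case_lemma _ _ _ _ (by decide) (by decide) (by decide) ht2
    have hb := String.toList_inj.mp h1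
    have he := String.toList_inj.mp h2
    subst hb; subst he
    decide)
  all_goals try (
    have ht := congrArg String.toList h
    rw [hkey] at ht
    have ht2 : pvRepl extension.toList base.toList ++ '_' :: extension.toList =
        "7525".toList ++ '_' :: "44052".toList := by rw [ht]; decide
    obtain ⟨h1, h2⟩ := case_lemma _ _ _ _ (by decide) (by decide) (by decide) ht2
    have hb := String.toList_inj.mp h1
    have he := String.toList_inj.mp h2
    subst hb; subst he
    decide)
  all_goals try (
    have ht := congrArg String.toList h
    rw [hkey] at ht
    have ht2 : pvRepl extension.toList base.toList ++ '_' :: extension.toList =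
        "7525".toList ++ '_' :: "44053".toList := by rw [ht]; decide
    obtain ⟨h1, h2⟩ := case_lemma _ _ _ _ (by decide) (by decide) (by decide) ht2
    have hb := String.toList_inj.mp h1
    have he := String.toList_inj.mp h2
    subst hb; subst he
    decide)
  all_goals try (
    have ht := congrArg String.toList h
    rw [hkey] at ht
    have ht2 : pvRepl extension.toList base.toList ++ '_' :: extension.toList =
        "7525".toList ++ '_' :: "44054".toList := by rw [ht]; decide
    obtain ⟨h1, h2⟩ := case_lemma _ _ _ _ (by decide) (by decide) (by decide) ht2
    have hb := String.toList_inj.mp h1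
    have he := String.toList_inj.mp h2
    subst hb; subst he
    decide)

theorem main_equiv (base extension submit_extra : String) :
    add_to_submit base extension submit_extra = add_to_submit_alt base extension submit_extra := by
  show (if (["5050_44051","5050_44052","5050_44053","5050_44054",
     "2575_44051","2575_44052","2575_44053","2575_44054",
     "7525_44051","7525_44052","7525_44053","7525_44054"] : List String).contains
      (PySem.Str.replace (PySem.Str.replace "{base}_{extension}" "{base}" base)
        "{extension}" extension) = true then
    submit_extra ++
      PySem.Str.replace (PySem.Str.replace "\nsbatch {base}_{extension}.sh\nsleep 1\n" "{base}" base)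
        "{extension}" extension
  else
    submit_extra) = add_to_submit_alt base extension submit_extra
  unfold add_to_submit_alt
  by_cases hc : ((base == "5050" || base == "2575" || base == "7525") &&
     (extension == "44051" || extension == "44052" || extension == "44053" ||
       extension == "44054")) = true
  · have hc2 := hc
    simp only [Bool.and_eq_true, Bool.or_eq_true, beq_iff_eq] at hc2
    obtain ⟨hb, he⟩ := hc2
    rcases hb with (rfl | rfl) | rfl <;> rcases he with ((rfl | rfl) | rfl) | rfl <;>
      · rw [if_pos (by decide), if_pos (by decide)]
        exact congrArg (fun s => submit_extra ++ s) (by decide)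
  · have hA : (["5050_44051","5050_44052","5050_44053","5050_44054",
       "2575_44051","2575_44052","2575_44053","2575_44054",
       "7525_44051","7525_44052","7525_44053","7525_44054"] : List String).contains
        (PySem.Str.replace (PySem.Str.replace "{base}_{extension}" "{base}" base)
          "{extension}" extension) ≠ true := by
      intro hmem
      exact hc (cond_forward base extension hmem)
    rw [if_neg hA, if_neg hc]

-- ===== VERDICT (by name: the statement is the Claim_ definition above) =====
theorem add_to_submit_spec : Claim_equal_add_to_submit := by
  intro base extension submit_extra _
  exact main_equiv base extension submit_extra
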